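-- pv_equiv track=rewrite | github.com/H8to-jp/ant_book_beginner_level | 2/1/2/ARC031-B.py | one_island_or_not
-- ===== SOURCE A (Python) =====
-- from collections import deque
--
-- D = [[-1, 0], [1, 0], [0, -1], [0, 1]]
--
-- def one_island_or_not(M:list):
--     t = 0
--     R = [[0 for i in range(10)] for j in range(10)]
--     for j in range(100):
--         hj = j // 10
--         wj = j % 10
--         if M[hj][wj] == 'o' and R[hj][wj] == 0:
--             t += 1
--             Q = deque([[hj, wj]])
--             if t >= 2:
--                 return False
--             else:
--                 #DFS
--                 while len(Q) > 0:
--                     for w in range(4):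
--                         hw = Q[0][0] + D[w][0]
--                         ww = Q[0][1] + D[w][1]
--                         if 0 <= hw and hw < 10 and 0 <= ww and ww < 10:
--                             if M[hw][ww] == 'o' and R[hw][ww] == 0:
--                                 R[hw][ww] = 1
--                                 Q.append([hw, ww])
--                             else:
--                                 R[hw][ww] = 2
--                                 pass
--                         else:
--                             pass
--                     Q.popleft()
--         else:
--             pass
--     return True
-- ===== SOURCE B (Python) =====
-- # Label-propagation flood fill: components are closed under repeated neighbour
-- # expansion (100 rounds suffice on a 100-cell grid); counts components found in
-- # a row-major scan and answers False as soon as a second one appears.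
-- D = ((-1, 0), (1, 0), (0, -1), (0, 1))
--
-- def one_island_or_not(M: list):
--     seen = set()
--     count = 0
--     for i in range(10):
--         for j in range(10):
--             if M[i][j] == 'o' and (i, j) not in seen:
--                 count += 1
--                 if count >= 2:
--                     return False
--                 comp = {(i, j)}
--                 for _ in range(100):
--                     nxt = set(comp)
--                     for (a, b) in comp:
--                         for (da, db) in D:
--                             na, nb = a + da, b + db
--                             if 0 <= na < 10 and 0 <= nb < 10 and M[na][nb] == 'o':
--                                 nxt.add((na, nb))
--                     comp = nxt
--                 seen |= comp
--     return True
-- ===== Notes on version B (the rewrite author's own statement) =====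
-- stated objective: alternative
-- what changed: Replaces the explicit deque-BFS with a 0/1/2 mark matrix by a label-propagation flood fill: each component is grown by repeatedly adding in-range 'o' 4-neighbours of the current set (100 rounds, enough for a 100-cell grid) into a visited set, counting components in the same row-major scan with the same early False on the second one.
import Mathlib
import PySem

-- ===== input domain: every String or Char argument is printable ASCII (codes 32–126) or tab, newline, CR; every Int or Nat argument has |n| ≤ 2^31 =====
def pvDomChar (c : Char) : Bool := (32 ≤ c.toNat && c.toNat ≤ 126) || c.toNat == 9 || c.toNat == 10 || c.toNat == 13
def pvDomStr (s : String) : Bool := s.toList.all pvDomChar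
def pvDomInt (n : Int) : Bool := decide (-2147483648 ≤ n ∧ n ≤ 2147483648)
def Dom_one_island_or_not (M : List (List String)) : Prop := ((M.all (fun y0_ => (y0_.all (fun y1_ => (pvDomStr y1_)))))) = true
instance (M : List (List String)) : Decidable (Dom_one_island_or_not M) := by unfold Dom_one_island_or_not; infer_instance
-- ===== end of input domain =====

-- B replaces A's deque-BFS flood fill with a label-propagation flood fill (repeated
-- 4-neighbour expansion of a visited set); same row-major component count, same answers.

-- ===== PORT A =====
-- shared cell access M[a][b] (total form via getD; Pre_ keeps every access in range)
def pvCell (M : List (List String)) (a b : Int) : String :=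
  (PySem.List.pyGet? ((PySem.List.pyGet? M a).getD []) b).getD ""

def pvDirs : List (Int × Int) := [(-1, 0), (1, 0), (0, -1), (0, 1)]

def pvInG (p : Int × Int) : Bool := decide (0 ≤ p.1 ∧ p.1 < 10 ∧ 0 ≤ p.2 ∧ p.2 < 10)

def pvAdd (p d : Int × Int) : Int × Int := (p.1 + d.1, p.2 + d.2)

-- the mark matrix R, as a pointwise-updated function (0 = unmarked, 1/2 as in A)
def pvUpd (R : Int × Int → Int) (c : Int × Int) (v : Int) : Int × Int → Int :=
  fun q => if q = c then v else R q

-- one direction of A's inner `for w in range(4)` loop body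
def pvStep (M : List (List String)) (q : Int × Int)
    (st : ((Int × Int) → Int) × List (Int × Int)) (d : Int × Int) :
    ((Int × Int) → Int) × List (Int × Int) :=
  let c := pvAdd q d
  if pvInG c = true then
    if pvCell M c.1 c.2 = "o" ∧ st.1 c = 0 then
      (pvUpd st.1 c 1, st.2 ++ [c])
    else (pvUpd st.1 c 2, st.2)
  else st

def pvNext (M : List (List String)) (q : Int × Int) (R : (Int × Int) → Int) :
    ((Int × Int) → Int) × List (Int × Int) :=
  List.foldl (pvStep M q) (R, ([] : List (Int × Int))) pvDirs

def pvGridL : List (Int × Int) :=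
  (List.range 10).flatMap (fun (i : Nat) => (List.range 10).map (fun (j : Nat) => ((i : Int), (j : Int))))

def pvGridF : Finset (Int × Int) := pvGridL.toFinset

def pvUnmarked (M : List (List String)) (R : (Int × Int) → Int) : Nat :=
  (pvGridF.filter (fun p => pvCell M p.1 p.2 = "o" ∧ R p = 0)).card

theorem mem_pvGridL (p : Int × Int) : p ∈ pvGridL ↔ pvInG p = true := by
  obtain ⟨a, b⟩ := p
  rw [pvGridL, pvInG, decide_eq_true_iff]
  constructor
  · intro h
    rw [List.mem_flatMap] at h
    obtain ⟨i, hi, h⟩ := h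
    rw [List.mem_map] at h
    obtain ⟨j, hj, he⟩ := h
    rw [List.mem_range] at hi hj
    injection he with e1 e2
    simp only []
    omega
  · intro h
    refine List.mem_flatMap.2 ⟨a.toNat, List.mem_range.2 (by omega),
      List.mem_map.2 ⟨b.toNat, List.mem_range.2 (by omega), ?_⟩⟩
    have e1 : ((a.toNat : Int)) = a := by omega
    have e2 : ((b.toNat : Int)) = b := by omega
    rw [e1, e2]

theorem pvUnmarked_upd_le (M : List (List String)) (R : (Int × Int) → Int)
    (c : Int × Int) (v : Int) (hv : v ≠ 0) :
    pvUnmarked M (pvUpd R c v) ≤ pvUnmarked M R := by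
  apply Finset.card_le_card
  intro p hp
  simp only [Finset.mem_filter, pvUpd] at hp ⊢
  rcases hp with ⟨hg, ho, h0⟩
  by_cases h : p = c
  · simp [h] at h0; exact absurd h0 hv
  · simp [h] at h0; exact ⟨hg, ho, h0⟩

theorem pvUnmarked_upd_lt (M : List (List String)) (R : (Int × Int) → Int)
    (c : Int × Int) (v : Int) (hv : v ≠ 0) (hg : pvInG c = true)
    (ho : pvCell M c.1 c.2 = "o") (h0 : R c = 0) :
    pvUnmarked M (pvUpd R c v) < pvUnmarked M R := by
  apply Finset.card_lt_card
  constructor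
  · intro p hp
    simp only [Finset.mem_filter, pvUpd] at hp ⊢
    rcases hp with ⟨hgp, hop, h0p⟩
    by_cases h : p = c
    · simp [h] at h0p; exact absurd h0p hv
    · simp [h] at h0p; exact ⟨hgp, hop, h0p⟩
  · intro hsub
    have hc : c ∈ pvGridF.filter (fun p => pvCell M p.1 p.2 = "o" ∧ R p = 0) := by
      simp only [Finset.mem_filter, pvGridF, List.mem_toFinset]
      exact ⟨(mem_pvGridL c).2 hg, ho, h0⟩
    have := hsub hc
    simp only [Finset.mem_filter, pvUpd] at this
    exact hv this.2.2

-- termination helper for pvBFS (cited by decreasing_by)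
theorem pvStep_fold_le (M : List (List String)) (q : Int × Int) :
    ∀ (ds : List (Int × Int)) (R : (Int × Int) → Int) (acc : List (Int × Int)),
      pvUnmarked M (List.foldl (pvStep M q) (R, acc) ds).1
        + (List.foldl (pvStep M q) (R, acc) ds).2.length
      ≤ pvUnmarked M R + acc.length := by
  intro ds
  induction ds with
  | nil => intro R acc; simp
  | cons d tl ih =>
    intro R acc
    rw [List.foldl_cons]
    by_cases h1 : pvInG (pvAdd q d) = true
    · by_cases h2 : pvCell M (pvAdd q d).1 (pvAdd q d).2 = "o" ∧ R (pvAdd q d) = 0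
      · have e : pvStep M q (R, acc) d = (pvUpd R (pvAdd q d) 1, acc ++ [pvAdd q d]) := by
          simp [pvStep, h1, h2]
        rw [e]
        have hlt := pvUnmarked_upd_lt M R (pvAdd q d) 1 (by norm_num) h1 h2.1 h2.2
        have := ih (pvUpd R (pvAdd q d) 1) (acc ++ [pvAdd q d])
        simp only [List.length_append, List.length_cons, List.length_nil] at this
        omega
      · have e : pvStep M q (R, acc) d = (pvUpd R (pvAdd q d) 2, acc) := by
          simp [pvStep, h1, h2]
        rw [e]
        have hle := pvUnmarked_upd_le M R (pvAdd q d) 2 (by norm_num)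
        have := ih (pvUpd R (pvAdd q d) 2) acc
        omega
    · have e : pvStep M q (R, acc) d = (R, acc) := by
        simp [pvStep, h1]
      rw [e]
      exact ih R acc

-- A's `while len(Q) > 0` BFS loop
set_option maxRecDepth 4000 in
def pvBFS (M : List (List String)) (R : (Int × Int) → Int) (Q : List (Int × Int)) :
    (Int × Int) → Int :=
  match Q with
  | [] => R
  | q :: rest =>
    let st := pvNext M q R
    pvBFS M st.1 (rest ++ st.2)
termination_by Q.length + pvUnmarked M R
decreasing_by
  have h := pvStep_fold_le M q pvDirs R []
  simp only [pvNext] at *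
  simp only [List.length_append, List.length_cons, List.length_nil] at *
  omega

-- A's `for j in range(100)` loop
def pvLoopA (M : List (List String)) (js : List Int) (t : Int) (R : (Int × Int) → Int) : Bool :=
  match js with
  | [] => true
  | j :: rest =>
    let hj := PySem.Int.floordiv j 10
    let wj := PySem.Int.mod j 10
    if pvCell M hj wj = "o" ∧ R (hj, wj) = 0 then
      if t + 1 ≥ 2 then false
      else pvLoopA M rest (t + 1) (pvBFS M R [(hj, wj)])
    else pvLoopA M rest t R

def one_island_or_not (M : List (List String)) : Bool :=
  pvLoopA M (PySem.List.pyRange 0 100 1) 0 (fun _ => 0)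

-- ===== PORT B =====
-- one expansion round: nxt = copy of comp, then add every in-range 'o' 4-neighbour
def pvExpand (M : List (List String)) (S : PySem.Set (Int × Int)) : PySem.Set (Int × Int) :=
  List.foldl (fun nxt ab =>
    List.foldl (fun nxt d =>
      let c := pvAdd ab d
      if pvInG c = true ∧ pvCell M c.1 c.2 = "o" then PySem.Set.add nxt c else nxt)
      nxt pvDirs) S S

-- `for _ in range(100): comp = expand(comp)` starting from {c}
def pvComp (M : List (List String)) (c : Int × Int) : PySem.Set (Int × Int) :=
  List.foldl (fun comp _ => pvExpand M comp) (PySem.Set.ofList [c]) (List.range 100)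

-- B's row-major scan (the two nested loops, flattened; early False on second component)
def pvLoopB (M : List (List String)) (cells : List (Int × Int)) (count : Int)
    (seen : PySem.Set (Int × Int)) : Bool :=
  match cells with
  | [] => true
  | c :: rest =>
    if pvCell M c.1 c.2 = "o" ∧ ¬ (PySem.Set.contains seen c = true) then
      if count + 1 ≥ 2 then false
      else pvLoopB M rest (count + 1) (PySem.Set.union seen (pvComp M c))
    else pvLoopB M rest count seen

def one_island_or_not_alt (M : List (List String)) : Bool :=
  pvLoopB M ((List.range 10).flatMap (fun (i : Nat) => (List.range 10).map (fun (j : Nat) => ((i : Int), (j : Int)))))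
    0 PySem.Set.empty

-- ===== PRECONDITION & SPEC =====
-- Pre_ states exactly the inputs on which the Python A returns normally (everywhere else it
-- raises IndexError): either the full 10x10 prefix of cells is present, or a second island is
-- found before any out-of-range access — i.e. there is a first 'o' cell s1 (everything before
-- it present and not 'o'), every in-range neighbour of s1's component is present, and a first
-- 'o' cell s2 outside that component follows with everything between present.  The equivalence
-- proof itself holds for every input (both ports are total, reading a missing cell as "").
def pvPresentB (M : List (List String)) (p : Int × Int) : Bool :=
  decide (0 ≤ p.1 ∧ p.1 < (M.length : Int) ∧ 0 ≤ p.2 ∧ p.2 < ((M.getD p.1.toNat []).length : Int))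

def pvOB (M : List (List String)) (p : Int × Int) : Bool :=
  pvInG p && pvPresentB M p && decide (pvCell M p.1 p.2 = "o")

def pvPreGrow (M : List (List String)) (S : Finset (Int × Int)) : Finset (Int × Int) :=
  S ∪ pvGridF.filter (fun p => pvOB M p = true ∧ ∃ q ∈ S, ∃ d ∈ pvDirs, p = pvAdd q d)

def pvPreComp (M : List (List String)) (s : Int × Int) : Nat → Finset (Int × Int)
  | 0 => {s}
  | n + 1 => pvPreGrow M (pvPreComp M s n)

def pvIdx (p : Int × Int) : Int := p.1 * 10 + p.2

def Pre_one_island_or_not (M : List (List String)) : Prop :=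
  (∀ p ∈ pvGridL, pvPresentB M p = true) ∨
  (∃ s1 ∈ pvGridL, pvOB M s1 = true ∧
    (∀ p ∈ pvGridL, pvIdx p < pvIdx s1 → pvPresentB M p = true ∧ ¬ pvCell M p.1 p.2 = "o") ∧
    (∀ p ∈ pvPreComp M s1 100, ∀ d ∈ pvDirs, pvInG (pvAdd p d) = true →
      pvPresentB M (pvAdd p d) = true) ∧
    (∃ s2 ∈ pvGridL, pvIdx s1 < pvIdx s2 ∧ pvOB M s2 = true ∧ s2 ∉ pvPreComp M s1 100 ∧
      (∀ p ∈ pvGridL, pvIdx s1 < pvIdx p → pvIdx p < pvIdx s2 →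
        pvPresentB M p = true ∧ (pvCell M p.1 p.2 = "o" → p ∈ pvPreComp M s1 100))))

instance (M : List (List String)) : Decidable (Pre_one_island_or_not M) := by
  unfold Pre_one_island_or_not; infer_instance

def pvWitness_one_island_or_not : List (List String) :=
  [["o", "x", "x", "x", "x", "x", "x", "x", "x", "x"],
   ["x", "x", "x", "x", "x", "x", "x", "x", "x", "x"],
   ["x", "x", "x", "x", "x", "x", "x", "x", "x", "x"],
   ["x", "x", "x", "x", "x", "x", "x", "x", "x", "x"],
   ["x", "x", "x", "x", "x", "x", "x", "x", "x", "x"],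
   ["x", "x", "x", "x", "x", "x", "x", "x", "x", "x"],
   ["x", "x", "x", "x", "x", "x", "x", "x", "x", "x"],
   ["x", "x", "x", "x", "x", "x", "x", "x", "x", "x"],
   ["x", "x", "x", "x", "x", "x", "x", "x", "x", "x"],
   ["x", "x", "x", "x", "x", "x", "x", "x", "x", "x"]]

def Spec_one_island_or_not (M : List (List String)) (out : Bool) : Prop :=
  out = one_island_or_not_alt M
instance (M : List (List String)) (out : Bool) : Decidable (Spec_one_island_or_not M out) := by
  unfold Spec_one_island_or_not; infer_instance

-- ===== CLAIM (what is proved, stated in full; the proofs are below) =====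
def Claim_equal_one_island_or_not : Prop :=
  ∀ (M : List (List String)), Dom_one_island_or_not M → Pre_one_island_or_not M →
    Spec_one_island_or_not M (one_island_or_not M)

-- ===== LEMMAS AND PROOFS =====

-- abstract vocabulary: 'o'-cells, 4-adjacency, reachability (the component relation)
def pvIsO (M : List (List String)) (p : Int × Int) : Prop := pvCell M p.1 p.2 = "o"

def pvAdj (M : List (List String)) (p r : Int × Int) : Prop :=
  pvInG p = true ∧ pvInG r = true ∧ pvIsO M p ∧ pvIsO M r ∧ ∃ d ∈ pvDirs, r = pvAdd p d

def pvReach (M : List (List String)) (s p : Int × Int) : Prop :=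
  Relation.ReflTransGen (pvAdj M) s p

def pvHasNbr (M : List (List String)) (p : Int × Int) : Prop := ∃ r, pvAdj M p r

theorem pvAdd_inj {q d d' : Int × Int} (h : pvAdd q d = pvAdd q d') : d = d' := by
  obtain ⟨a, b⟩ := d; obtain ⟨x, y⟩ := d'
  simp only [pvAdd, Prod.mk.injEq] at h ⊢
  omega

theorem pvAdj_symm {M : List (List String)} {p r : Int × Int} (h : pvAdj M p r) : pvAdj M r p := by
  obtain ⟨hp, hr, op, orr, d, hd, he⟩ := h
  refine ⟨hr, hp, orr, op, ?_⟩
  obtain ⟨a, b⟩ := p; obtain ⟨x, y⟩ := r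
  simp only [pvDirs, List.mem_cons, List.not_mem_nil, or_false] at hd
  rcases hd with rfl | rfl | rfl | rfl
  · exact ⟨(1, 0), by simp [pvDirs], by simp only [pvAdd, Prod.mk.injEq] at he ⊢; omega⟩
  · exact ⟨(-1, 0), by simp [pvDirs], by simp only [pvAdd, Prod.mk.injEq] at he ⊢; omega⟩
  · exact ⟨(0, 1), by simp [pvDirs], by simp only [pvAdd, Prod.mk.injEq] at he ⊢; omega⟩
  · exact ⟨(0, -1), by simp [pvDirs], by simp only [pvAdd, Prod.mk.injEq] at he ⊢; omega⟩

theorem pvAdj_ne {M : List (List String)} {p r : Int × Int} (h : pvAdj M p r) : p ≠ r := by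
  obtain ⟨hp, hr, op, orr, d, hd, he⟩ := h
  obtain ⟨a, b⟩ := p; obtain ⟨x, y⟩ := r
  simp only [pvDirs, List.mem_cons, List.not_mem_nil, or_false] at hd
  intro hpr
  rw [← hpr] at he
  rcases hd with rfl | rfl | rfl | rfl <;>
    · simp only [pvAdd, Prod.mk.injEq] at he
      omega

theorem pvStep_fold_char (M : List (List String)) (q : Int × Int) :
    ∀ (ds : List (Int × Int)), ds.Nodup → ∀ (R : (Int × Int) → Int) (acc : List (Int × Int)),
      (∀ p, (List.foldl (pvStep M q) (R, acc) ds).1 p =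
        if (∃ d ∈ ds, p = pvAdd q d) ∧ pvInG p = true then
          (if pvCell M p.1 p.2 = "o" ∧ R p = 0 then 1 else 2)
        else R p)
      ∧ (∀ p, p ∈ (List.foldl (pvStep M q) (R, acc) ds).2 ↔
          p ∈ acc ∨ ((∃ d ∈ ds, p = pvAdd q d) ∧ pvInG p = true ∧ pvCell M p.1 p.2 = "o" ∧ R p = 0)) := by
  intro ds
  induction ds with
  | nil => intro _ R acc; refine ⟨fun p => by simp, fun p => by simp⟩
  | cons d tl ih =>
    intro hnd R acc
    rw [List.nodup_cons] at hnd
    obtain ⟨hdtl, htl⟩ := hnd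
    rw [List.foldl_cons]
    have hinj : ∀ d' ∈ tl, pvAdd q d ≠ pvAdd q d' := by
      intro d' hd' he
      exact hdtl (pvAdd_inj he ▸ hd')
    have hcond : ∀ p, p ≠ pvAdd q d →
        (((∃ d' ∈ tl, p = pvAdd q d') ∧ pvInG p = true)
          ↔ ((∃ d' ∈ d :: tl, p = pvAdd q d') ∧ pvInG p = true)) := by
      intro p hpc
      constructor
      · rintro ⟨⟨d', hd', he⟩, hg⟩; exact ⟨⟨d', List.mem_cons_of_mem _ hd', he⟩, hg⟩
      · rintro ⟨⟨d', hd', he⟩, hg⟩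
        rcases List.mem_cons.1 hd' with rfl | hmem
        · exact absurd he hpc
        · exact ⟨⟨d', hmem, he⟩, hg⟩
    by_cases h1 : pvInG (pvAdd q d) = true
    · by_cases h2 : pvCell M (pvAdd q d).1 (pvAdd q d).2 = "o" ∧ R (pvAdd q d) = 0
      · -- mark 1 and enqueue
        have e : pvStep M q (R, acc) d = (pvUpd R (pvAdd q d) 1, acc ++ [pvAdd q d]) := by
          simp [pvStep, h1, h2]
        rw [e]
        obtain ⟨ihf, ihs⟩ := ih htl (pvUpd R (pvAdd q d) 1) (acc ++ [pvAdd q d])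
        constructor
        · intro p
          rw [ihf p]
          by_cases hpc : p = pvAdd q d
          · have hne : ¬ (∃ d' ∈ tl, p = pvAdd q d') := by
              rintro ⟨d', hd', he⟩; exact hinj d' hd' (hpc ▸ he)
            rw [if_neg (by rintro ⟨hex, _⟩; exact hne hex)]
            have hupd : pvUpd R (pvAdd q d) 1 p = 1 := by simp [pvUpd, hpc]
            rw [hupd, if_pos ⟨⟨d, List.mem_cons_self .., hpc⟩, hpc ▸ h1⟩,
              if_pos ⟨by rw [hpc]; exact h2.1, by rw [hpc]; exact h2.2⟩]
          · have hupd : pvUpd R (pvAdd q d) 1 p = R p := by simp [pvUpd, hpc]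
            rw [hupd]
            by_cases hc : (∃ d' ∈ tl, p = pvAdd q d') ∧ pvInG p = true
            · rw [if_pos hc, if_pos ((hcond p hpc).1 hc)]
            · rw [if_neg hc, if_neg (fun hh => hc ((hcond p hpc).2 hh))]
        · intro p
          rw [ihs p]
          by_cases hpc : p = pvAdd q d
          · constructor
            · intro _
              exact Or.inr ⟨⟨d, List.mem_cons_self .., hpc⟩, hpc ▸ h1, hpc ▸ h2.1, hpc ▸ h2.2⟩
            · intro _
              exact Or.inl (List.mem_append.2 (Or.inr (List.mem_singleton.2 hpc)))
          · have hupd : pvUpd R (pvAdd q d) 1 p = R p := by simp [pvUpd, hpc]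
            rw [hupd]
            constructor
            · rintro (hacc | ⟨⟨d', hd', he⟩, hg, hc, h0⟩)
              · rcases List.mem_append.1 hacc with hacc | hs
                · exact Or.inl hacc
                · exact absurd (List.mem_singleton.1 hs) hpc
              · exact Or.inr ⟨⟨d', List.mem_cons_of_mem _ hd', he⟩, hg, hc, h0⟩
            · rintro (hacc | ⟨⟨d', hd', he⟩, hg, hc, h0⟩)
              · exact Or.inl (List.mem_append.2 (Or.inl hacc))
              · rcases List.mem_cons.1 hd' with rfl | hmem
                · exact absurd he hpc
                · exact Or.inr ⟨⟨d', hmem, he⟩, hg, hc, h0⟩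
      · -- mark 2
        have e : pvStep M q (R, acc) d = (pvUpd R (pvAdd q d) 2, acc) := by
          simp [pvStep, h1, h2]
        rw [e]
        obtain ⟨ihf, ihs⟩ := ih htl (pvUpd R (pvAdd q d) 2) acc
        constructor
        · intro p
          rw [ihf p]
          by_cases hpc : p = pvAdd q d
          · have hne : ¬ (∃ d' ∈ tl, p = pvAdd q d') := by
              rintro ⟨d', hd', he⟩; exact hinj d' hd' (hpc ▸ he)
            rw [if_neg (by rintro ⟨hex, _⟩; exact hne hex)]
            have hupd : pvUpd R (pvAdd q d) 2 p = 2 := by simp [pvUpd, hpc]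
            rw [hupd, if_pos ⟨⟨d, List.mem_cons_self .., hpc⟩, hpc ▸ h1⟩,
              if_neg (fun hh => h2 (hpc ▸ hh))]
          · have hupd : pvUpd R (pvAdd q d) 2 p = R p := by simp [pvUpd, hpc]
            rw [hupd]
            by_cases hc : (∃ d' ∈ tl, p = pvAdd q d') ∧ pvInG p = true
            · rw [if_pos hc, if_pos ((hcond p hpc).1 hc)]
            · rw [if_neg hc, if_neg (fun hh => hc ((hcond p hpc).2 hh))]
        · intro p
          rw [ihs p]
          by_cases hpc : p = pvAdd q d
          · have hne : ¬ (∃ d' ∈ tl, p = pvAdd q d') := by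
              rintro ⟨d', hd', he⟩; exact hinj d' hd' (hpc ▸ he)
            constructor
            · rintro (hacc | ⟨hex, _⟩)
              · exact Or.inl hacc
              · exact absurd hex hne
            · rintro (hacc | ⟨⟨d', hd', he⟩, hg, hc, h0⟩)
              · exact Or.inl hacc
              · rcases List.mem_cons.1 hd' with rfl | hmem
                · exact absurd ⟨he ▸ hc, he ▸ h0⟩ h2
                · exact absurd ⟨d', hmem, he⟩ hne
          · have hupd : pvUpd R (pvAdd q d) 2 p = R p := by simp [pvUpd, hpc]
            rw [hupd]
            constructor
            · rintro (hacc | ⟨⟨d', hd', he⟩, hg, hc, h0⟩)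
              · exact Or.inl hacc
              · exact Or.inr ⟨⟨d', List.mem_cons_of_mem _ hd', he⟩, hg, hc, h0⟩
            · rintro (hacc | ⟨⟨d', hd', he⟩, hg, hc, h0⟩)
              · exact Or.inl hacc
              · rcases List.mem_cons.1 hd' with rfl | hmem
                · exact absurd he hpc
                · exact Or.inr ⟨⟨d', hmem, he⟩, hg, hc, h0⟩
    · -- out of range: skip
      have e : pvStep M q (R, acc) d = (R, acc) := by simp [pvStep, h1]
      rw [e]
      obtain ⟨ihf, ihs⟩ := ih htl R acc
      have hcond' : ∀ p, ((∃ d' ∈ tl, p = pvAdd q d') ∧ pvInG p = true)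
          ↔ ((∃ d' ∈ d :: tl, p = pvAdd q d') ∧ pvInG p = true) := by
        intro p
        constructor
        · rintro ⟨⟨d', hd', he⟩, hg⟩; exact ⟨⟨d', List.mem_cons_of_mem _ hd', he⟩, hg⟩
        · rintro ⟨⟨d', hd', he⟩, hg⟩
          rcases List.mem_cons.1 hd' with rfl | hmem
          · subst he; exact absurd hg h1
          · exact ⟨⟨d', hmem, he⟩, hg⟩
      constructor
      · intro p
        rw [ihf p]
        by_cases hc : (∃ d' ∈ tl, p = pvAdd q d') ∧ pvInG p = true
        · rw [if_pos hc, if_pos ((hcond' p).1 hc)]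
        · rw [if_neg hc, if_neg (fun hh => hc ((hcond' p).2 hh))]
      · intro p
        rw [ihs p]
        constructor
        · rintro (hacc | ⟨hex, hg, hc, h0⟩)
          · exact Or.inl hacc
          · exact Or.inr ⟨((hcond' p).1 ⟨hex, hg⟩).1, hg, hc, h0⟩
        · rintro (hacc | ⟨hex, hg, hc, h0⟩)
          · exact Or.inl hacc
          · exact Or.inr ⟨((hcond' p).2 ⟨hex, hg⟩).1, hg, hc, h0⟩

-- characterization of one BFS step (the 4-direction fold)
theorem pvNext_fst (M : List (List String)) (q : Int × Int) (R : (Int × Int) → Int)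
    (p : Int × Int) :
    (pvNext M q R).1 p =
      if (∃ d ∈ pvDirs, p = pvAdd q d) ∧ pvInG p = true then
        (if pvCell M p.1 p.2 = "o" ∧ R p = 0 then 1 else 2)
      else R p := by
  exact (pvStep_fold_char M q pvDirs (by decide) R []).1 p

theorem pvNext_snd_mem (M : List (List String)) (q : Int × Int) (R : (Int × Int) → Int)
    (p : Int × Int) :
    p ∈ (pvNext M q R).2 ↔
      (∃ d ∈ pvDirs, p = pvAdd q d) ∧ pvInG p = true ∧ pvIsO M p ∧ R p = 0 := by
  have h := (pvStep_fold_char M q pvDirs (by decide) R []).2 p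
  simp only [List.not_mem_nil, false_or] at h
  exact h

theorem pvBFS_nil (M : List (List String)) (R : (Int × Int) → Int) :
    pvBFS M R [] = R := by
  rw [pvBFS.eq_def]

theorem pvBFS_cons (M : List (List String)) (R : (Int × Int) → Int) (q : Int × Int)
    (rest : List (Int × Int)) :
    pvBFS M R (q :: rest) = pvBFS M (pvNext M q R).1 (rest ++ (pvNext M q R).2) := by
  rw [pvBFS.eq_def]

-- induction principle for the BFS loop
theorem pvBFS_ind (M : List (List String)) (P : ((Int × Int) → Int) → List (Int × Int) → Prop)
    (h0 : ∀ R, P R [])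
    (h1 : ∀ R q rest, P (pvNext M q R).1 (rest ++ (pvNext M q R).2) → P R (q :: rest)) :
    ∀ R Q, P R Q := by
  have key : ∀ n (R : (Int × Int) → Int) (Q : List (Int × Int)),
      Q.length + pvUnmarked M R ≤ n → P R Q := by
    intro n
    induction n with
    | zero =>
      intro R Q h
      cases Q with
      | nil => exact h0 R
      | cons q rest => simp at h
    | succ n ihn =>
      intro R Q h
      cases Q with
      | nil => exact h0 R
      | cons q rest =>
        apply h1
        apply ihn
        have hle := pvStep_fold_le M q pvDirs R []
        simp only [pvNext, List.length_append, List.length_cons, List.length_nil] at *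
        omega
  intro R Q
  exact key (Q.length + pvUnmarked M R) R Q le_rfl

theorem pvBFS_mono (M : List (List String)) :
    ∀ (R : (Int × Int) → Int) (Q : List (Int × Int)), ∀ p, R p ≠ 0 → pvBFS M R Q p ≠ 0 := by
  apply pvBFS_ind M (fun R Q => ∀ p, R p ≠ 0 → pvBFS M R Q p ≠ 0)
  · intro R p h
    rw [pvBFS_nil]; exact h
  · intro R q rest ih p h
    rw [pvBFS_cons]
    apply ih
    rw [pvNext_fst]
    split
    · split <;> norm_num
    · exact h

theorem pvBFS_enq (M : List (List String)) :
    ∀ (R : (Int × Int) → Int) (Q : List (Int × Int)),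
      ∀ c ∈ Q, ∀ d ∈ pvDirs, pvInG (pvAdd c d) = true → pvBFS M R Q (pvAdd c d) ≠ 0 := by
  apply pvBFS_ind M
    (fun R Q => ∀ c ∈ Q, ∀ d ∈ pvDirs, pvInG (pvAdd c d) = true → pvBFS M R Q (pvAdd c d) ≠ 0)
  · intro R c hc; simp at hc
  · intro R q rest ih c hc d hd hg
    rw [pvBFS_cons]
    rcases List.mem_cons.1 hc with rfl | hmem
    · apply pvBFS_mono
      rw [pvNext_fst, if_pos ⟨⟨d, hd, rfl⟩, hg⟩]
      split <;> norm_num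
    · exact ih c (List.mem_append.2 (Or.inl hmem)) d hd hg

theorem pvBFS_closure (M : List (List String)) :
    ∀ (R : (Int × Int) → Int) (Q : List (Int × Int)),
      ∀ p, pvIsO M p → pvBFS M R Q p ≠ 0 →
        R p ≠ 0 ∨ ∀ r, pvAdj M p r → pvBFS M R Q r ≠ 0 := by
  apply pvBFS_ind M
    (fun R Q => ∀ p, pvIsO M p → pvBFS M R Q p ≠ 0 →
      R p ≠ 0 ∨ ∀ r, pvAdj M p r → pvBFS M R Q r ≠ 0)
  · intro R p _ h
    rw [pvBFS_nil] at h
    exact Or.inl h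
  · intro R q rest ih p ho h
    rw [pvBFS_cons] at h
    rcases ih p ho h with h' | h'
    · -- R₁ p ≠ 0
      rw [pvNext_fst] at h'
      by_cases hcnd : (∃ d ∈ pvDirs, p = pvAdd q d) ∧ pvInG p = true
      · rw [if_pos hcnd] at h'
        by_cases h0 : R p = 0
        · -- p freshly marked, hence enqueued
          right
          intro r hr
          rw [pvBFS_cons]
          obtain ⟨_, hgr, _, _, d', hd', he⟩ := hr
          have hpmem : p ∈ (pvNext M q R).2 := by
            rw [pvNext_snd_mem]
            exact ⟨hcnd.1, hcnd.2, ho, h0⟩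
          have := pvBFS_enq M (pvNext M q R).1 (rest ++ (pvNext M q R).2) p
            (List.mem_append.2 (Or.inr hpmem)) d' hd' (he ▸ hgr)
          rw [← he] at this
          exact this
        · exact Or.inl h0
      · rw [if_neg hcnd] at h'
        exact Or.inl h'
    · right
      intro r hr
      rw [pvBFS_cons]
      exact h' r hr

theorem pvBFS_sound (M : List (List String)) :
    ∀ (R : (Int × Int) → Int) (Q : List (Int × Int)),
      (∀ c ∈ Q, pvInG c = true ∧ pvIsO M c) →
      ∀ p, pvIsO M p → pvBFS M R Q p ≠ 0 →
        R p ≠ 0 ∨ ((∃ c ∈ Q, pvReach M c p) ∧ pvHasNbr M p) := by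
  apply pvBFS_ind M
    (fun R Q => (∀ c ∈ Q, pvInG c = true ∧ pvIsO M c) →
      ∀ p, pvIsO M p → pvBFS M R Q p ≠ 0 →
        R p ≠ 0 ∨ ((∃ c ∈ Q, pvReach M c p) ∧ pvHasNbr M p))
  · intro R _ p _ h
    rw [pvBFS_nil] at h
    exact Or.inl h
  · intro R q rest ih hQ p ho h
    rw [pvBFS_cons] at h
    have hq := hQ q (List.mem_cons_self ..)
    have hQ1 : ∀ c ∈ rest ++ (pvNext M q R).2, pvInG c = true ∧ pvIsO M c := by
      intro c hc
      rcases List.mem_append.1 hc with hc | hc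
      · exact hQ c (List.mem_cons_of_mem _ hc)
      · rw [pvNext_snd_mem] at hc
        exact ⟨hc.2.1, hc.2.2.1⟩
    rcases ih hQ1 p ho h with h' | ⟨⟨c, hc, hrc⟩, hnb⟩
    · rw [pvNext_fst] at h'
      by_cases hcnd : (∃ d ∈ pvDirs, p = pvAdd q d) ∧ pvInG p = true
      · obtain ⟨⟨d, hd, he⟩, hg⟩ := hcnd
        have hadj : pvAdj M q p := ⟨hq.1, hg, hq.2, ho, d, hd, he⟩
        exact Or.inr ⟨⟨q, List.mem_cons_self .., Relation.ReflTransGen.single hadj⟩,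
          ⟨q, pvAdj_symm hadj⟩⟩
      · rw [if_neg hcnd] at h'
        exact Or.inl h'
    · rcases List.mem_append.1 hc with hc | hc
      · exact Or.inr ⟨⟨c, List.mem_cons_of_mem _ hc, hrc⟩, hnb⟩
      · rw [pvNext_snd_mem] at hc
        obtain ⟨⟨d, hd, he⟩, hg, hoc, _⟩ := hc
        have hadj : pvAdj M q c := ⟨hq.1, hg, hq.2, hoc, d, hd, he⟩
        exact Or.inr ⟨⟨q, List.mem_cons_self .., Relation.ReflTransGen.head hadj hrc⟩, hnb⟩

theorem pvBFS_reach_marked (M : List (List String)) (s : Int × Int)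
    (R : (Int × Int) → Int) (hpre : ∀ p, pvReach M s p → R p = 0) :
    ∀ p, pvReach M s p → p ≠ s → pvBFS M R [s] p ≠ 0 := by
  intro p hreach
  induction hreach with
  | refl => intro h; exact absurd rfl h
  | tail hsb hadj ih =>
    rename_i b p'
    intro _
    by_cases hbs : b = s
    · subst hbs
      obtain ⟨hgs, hgp, hos, hop, d, hd, he⟩ := hadj
      rw [he]
      exact pvBFS_enq M R [b] b (List.mem_singleton.2 rfl) d hd (he ▸ hgp)
    · have hb := ih hbs
      rcases pvBFS_closure M R [s] b hadj.2.2.1 hb with h0 | hcl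
      · exact absurd (hpre b hsb) (by intro he; exact h0 he)
      · exact hcl p' hadj

-- the BFS flood fill, fully characterized
theorem pvBFS_char (M : List (List String)) (s : Int × Int)
    (hs : pvInG s = true) (ho : pvIsO M s)
    (R : (Int × Int) → Int) (hpre : ∀ p, pvReach M s p → R p = 0) :
    ∀ p, pvIsO M p →
      (pvBFS M R [s] p ≠ 0 ↔ R p ≠ 0 ∨ (pvReach M s p ∧ pvHasNbr M p)) := by
  intro p hop
  constructor
  · intro h
    have hQ : ∀ c ∈ [s], pvInG c = true ∧ pvIsO M c := by
      intro c hc; rw [List.mem_singleton] at hc; subst hc; exact ⟨hs, ho⟩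
    rcases pvBFS_sound M R [s] hQ p hop h with h' | ⟨⟨c, hc, hrc⟩, hnb⟩
    · exact Or.inl h'
    · rw [List.mem_singleton] at hc; subst hc
      exact Or.inr ⟨hrc, hnb⟩
  · rintro (h | ⟨hreach, r, hadj⟩)
    · exact pvBFS_mono M R [s] p h
    · by_cases hps : p = s
      · subst hps
        have hrps : pvReach M p r := Relation.ReflTransGen.single hadj
        have hrm : pvBFS M R [p] r ≠ 0 := by
          apply pvBFS_reach_marked M p R hpre r hrps
          exact fun he => pvAdj_ne hadj he.symm
        rcases pvBFS_closure M R [p] r hadj.2.2.2.1 hrm with h0 | hcl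
        · exact absurd (hpre r hrps) (fun he => h0 he)
        · exact hcl p (pvAdj_symm hadj)
      · exact pvBFS_reach_marked M s R hpre p hreach hps

-- ----- B side: the label-propagation flood fill computes the same component -----

theorem pvExpand_inner_mem (M : List (List String)) (a : Int × Int) :
    ∀ (ds : List (Int × Int)) (nxt : PySem.Set (Int × Int)) (p : Int × Int),
      p ∈ List.foldl (fun nxt d =>
          let c := pvAdd a d
          if pvInG c = true ∧ pvCell M c.1 c.2 = "o" then PySem.Set.add nxt c else nxt) nxt ds
      ↔ p ∈ nxt ∨ ∃ d ∈ ds,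
          pvInG (pvAdd a d) = true ∧ pvCell M (pvAdd a d).1 (pvAdd a d).2 = "o" ∧ p = pvAdd a d := by
  intro ds
  induction ds with
  | nil => intro nxt p; simp
  | cons d tl ih =>
    intro nxt p
    rw [List.foldl_cons]
    by_cases h : pvInG (pvAdd a d) = true ∧ pvCell M (pvAdd a d).1 (pvAdd a d).2 = "o"
    · simp only [h, and_self, if_pos]
      rw [ih]
      rw [PySem.Set.mem_add]
      constructor
      · rintro ((hn | rfl) | ⟨d', hd', hh⟩)
        · exact Or.inl hn
        · exact Or.inr ⟨d, List.mem_cons_self .., h.1, h.2, rfl⟩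
        · exact Or.inr ⟨d', List.mem_cons_of_mem _ hd', hh⟩
      · rintro (hn | ⟨d', hd', hg, hc, he⟩)
        · exact Or.inl (Or.inl hn)
        · rcases List.mem_cons.1 hd' with rfl | hmem
          · exact Or.inl (Or.inr he)
          · exact Or.inr ⟨d', hmem, hg, hc, he⟩
    · simp only [h, if_false]
      rw [ih]
      constructor
      · rintro (hn | ⟨d', hd', hh⟩)
        · exact Or.inl hn
        · exact Or.inr ⟨d', List.mem_cons_of_mem _ hd', hh⟩
      · rintro (hn | ⟨d', hd', hg, hc, he⟩)
        · exact Or.inl hn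
        · rcases List.mem_cons.1 hd' with rfl | hmem
          · exact absurd ⟨hg, hc⟩ h
          · exact Or.inr ⟨d', hmem, hg, hc, he⟩

theorem pvExpand_outer_mem (M : List (List String)) :
    ∀ (l : List (Int × Int)) (s : PySem.Set (Int × Int)) (p : Int × Int),
      p ∈ List.foldl (fun nxt ab =>
          List.foldl (fun nxt d =>
            let c := pvAdd ab d
            if pvInG c = true ∧ pvCell M c.1 c.2 = "o" then PySem.Set.add nxt c else nxt)
            nxt pvDirs) s l
      ↔ p ∈ s ∨ ∃ a ∈ l, ∃ d ∈ pvDirs,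
          pvInG (pvAdd a d) = true ∧ pvCell M (pvAdd a d).1 (pvAdd a d).2 = "o" ∧ p = pvAdd a d := by
  intro l
  induction l with
  | nil => intro s p; simp
  | cons a tl ih =>
    intro s p
    rw [List.foldl_cons, ih, pvExpand_inner_mem]
    constructor
    · rintro ((hn | ⟨d, hd, hh⟩) | ⟨a', ha', hh⟩)
      · exact Or.inl hn
      · exact Or.inr ⟨a, List.mem_cons_self .., d, hd, hh⟩
      · exact Or.inr ⟨a', List.mem_cons_of_mem _ ha', hh⟩
    · rintro (hn | ⟨a', ha', hh⟩)
      · exact Or.inl (Or.inl hn)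
      · rcases List.mem_cons.1 ha' with rfl | hmem
        · exact Or.inl (Or.inr hh)
        · exact Or.inr ⟨a', hmem, hh⟩

theorem mem_pvExpand (M : List (List String)) (S : PySem.Set (Int × Int)) (p : Int × Int) :
    p ∈ pvExpand M S ↔
      p ∈ S ∨ ∃ a ∈ S, ∃ d ∈ pvDirs,
        pvInG (pvAdd a d) = true ∧ pvIsO M (pvAdd a d) ∧ p = pvAdd a d := by
  exact pvExpand_outer_mem M S S p

def pvCompSeq (M : List (List String)) (c : Int × Int) (n : Nat) : PySem.Set (Int × Int) :=
  List.foldl (fun comp _ => pvExpand M comp) (PySem.Set.ofList [c]) (List.range n)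

theorem pvCompSeq_succ (M : List (List String)) (c : Int × Int) (n : Nat) :
    pvCompSeq M c (n + 1) = pvExpand M (pvCompSeq M c n) := by
  rw [pvCompSeq, pvCompSeq, List.range_succ, List.foldl_append, List.foldl_cons, List.foldl_nil]

theorem pvReach_elem {M : List (List String)} {c p : Int × Int} (h : pvReach M c p) :
    p = c ∨ (pvInG p = true ∧ pvIsO M p) := by
  induction h with
  | refl => exact Or.inl rfl
  | tail _ hadj _ => exact Or.inr ⟨hadj.2.1, hadj.2.2.2.1⟩

theorem pvCompSeq_zero (M : List (List String)) (c : Int × Int) :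
    pvCompSeq M c 0 = [c] := by
  rfl

theorem pvCompSeq_reach (M : List (List String)) (c : Int × Int)
    (hs : pvInG c = true) (ho : pvIsO M c) :
    ∀ n p, p ∈ pvCompSeq M c n → pvReach M c p := by
  intro n
  induction n with
  | zero =>
    intro p hp
    rw [pvCompSeq_zero, List.mem_singleton] at hp
    subst hp
    exact Relation.ReflTransGen.refl
  | succ n ih =>
    intro p hp
    rw [pvCompSeq_succ, mem_pvExpand] at hp
    rcases hp with hp | ⟨a, ha, d, hd, hg, hoc, he⟩
    · exact ih p hp
    · have hra := ih a ha
      have haprops : pvInG a = true ∧ pvIsO M a := by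
        rcases pvReach_elem hra with rfl | h
        · exact ⟨hs, ho⟩
        · exact h
      have hadj : pvAdj M a (pvAdd a d) := ⟨haprops.1, hg, haprops.2, hoc, d, hd, rfl⟩
      rw [he]
      exact Relation.ReflTransGen.tail hra hadj

theorem pvCompSeq_mono (M : List (List String)) (c : Int × Int) (n : Nat) :
    ∀ p, p ∈ pvCompSeq M c n → p ∈ pvCompSeq M c (n + 1) := by
  intro p hp
  rw [pvCompSeq_succ, mem_pvExpand]
  exact Or.inl hp

theorem pvCompSeq_le_mono (M : List (List String)) (c : Int × Int) :
    ∀ {n m : Nat}, n ≤ m → ∀ p, p ∈ pvCompSeq M c n → p ∈ pvCompSeq M c m := by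
  intro n m hnm
  induction m with
  | zero =>
    intro p hp
    have : n = 0 := Nat.le_zero.1 hnm
    rwa [← this]
  | succ m ihm =>
    intro p hp
    rcases Nat.lt_or_ge n (m + 1) with h | h
    · exact pvCompSeq_mono M c m p (ihm (by omega) p hp)
    · have : n = m + 1 := by omega
      rwa [← this]

theorem pvExpand_congr (M : List (List String)) (S T : PySem.Set (Int × Int))
    (h : ∀ p, p ∈ S ↔ p ∈ T) :
    ∀ p, p ∈ pvExpand M S ↔ p ∈ pvExpand M T := by
  intro p
  rw [mem_pvExpand, mem_pvExpand]
  constructor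
  · rintro (hp | ⟨a, ha, hh⟩)
    · exact Or.inl ((h p).1 hp)
    · exact Or.inr ⟨a, (h a).1 ha, hh⟩
  · rintro (hp | ⟨a, ha, hh⟩)
    · exact Or.inl ((h p).2 hp)
    · exact Or.inr ⟨a, (h a).2 ha, hh⟩

theorem pvCompSeq_card_grow (M : List (List String)) (c : Int × Int) :
    ∀ k, (∀ j, j < k → (pvCompSeq M c j).toFinset ≠ (pvCompSeq M c (j + 1)).toFinset) →
      k < (pvCompSeq M c k).toFinset.card := by
  intro k
  induction k with
  | zero =>
    intro _
    apply Finset.card_pos.2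
    exact ⟨c, by rw [List.mem_toFinset, pvCompSeq_zero]; exact List.mem_singleton.2 rfl⟩
  | succ k ih =>
    intro h
    have hk := ih (fun j hj => h j (by omega))
    have hsub : (pvCompSeq M c k).toFinset ⊆ (pvCompSeq M c (k + 1)).toFinset := by
      intro p hp
      rw [List.mem_toFinset] at hp ⊢
      exact pvCompSeq_mono M c k p hp
    have hlt : (pvCompSeq M c k).toFinset.card < (pvCompSeq M c (k + 1)).toFinset.card :=
      Finset.card_lt_card (Finset.ssubset_iff_subset_ne.2 ⟨hsub, h k (by omega)⟩)
    omega

theorem pvCompSeq_card_le (M : List (List String)) (c : Int × Int)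
    (hs : pvInG c = true) (ho : pvIsO M c) (n : Nat) :
    (pvCompSeq M c n).toFinset.card ≤ 100 := by
  have hsub : (pvCompSeq M c n).toFinset ⊆ pvGridF := by
    intro p hp
    rw [List.mem_toFinset] at hp
    have hreach := pvCompSeq_reach M c hs ho n p hp
    have hg : pvInG p = true := by
      rcases pvReach_elem hreach with rfl | h
      · exact hs
      · exact h.1
    rw [pvGridF, List.mem_toFinset, mem_pvGridL]
    exact hg
  calc (pvCompSeq M c n).toFinset.card ≤ pvGridF.card := Finset.card_le_card hsub
    _ ≤ pvGridL.length := List.toFinset_card_le pvGridL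
    _ = 100 := by rfl

theorem pvCompSeq_stable (M : List (List String)) (c : Int × Int) (j : Nat)
    (hfix : ∀ p, p ∈ pvCompSeq M c (j + 1) ↔ p ∈ pvCompSeq M c j) :
    ∀ k p, p ∈ pvCompSeq M c (j + k) ↔ p ∈ pvCompSeq M c j := by
  intro k
  induction k with
  | zero => intro p; rfl
  | succ k ih =>
    intro p
    have : j + (k + 1) = (j + k) + 1 := by omega
    rw [this, pvCompSeq_succ]
    have h1 := pvExpand_congr M (pvCompSeq M c (j + k)) (pvCompSeq M c j) ih p
    rw [h1, ← pvCompSeq_succ]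
    exact hfix p

theorem pvComp_fix (M : List (List String)) (c : Int × Int)
    (hs : pvInG c = true) (ho : pvIsO M c) :
    ∀ p, p ∈ pvExpand M (pvCompSeq M c 100) ↔ p ∈ pvCompSeq M c 100 := by
  have hex : ∃ j, j < 100 ∧
      ∀ p, p ∈ pvCompSeq M c (j + 1) ↔ p ∈ pvCompSeq M c j := by
    by_contra hcon
    push Not at hcon
    have hne : ∀ j, j < 100 → (pvCompSeq M c j).toFinset ≠ (pvCompSeq M c (j + 1)).toFinset := by
      intro j hj he
      obtain ⟨p, hp⟩ := hcon j hj
      have := Finset.ext_iff.1 he p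
      rw [List.mem_toFinset, List.mem_toFinset] at this
      tauto
    have := pvCompSeq_card_grow M c 100 hne
    have hle := pvCompSeq_card_le M c hs ho 100
    omega
  obtain ⟨j, hj, hfix⟩ := hex
  have hst := pvCompSeq_stable M c j hfix
  have h100 : ∀ p, p ∈ pvCompSeq M c 100 ↔ p ∈ pvCompSeq M c j := by
    have : j + (100 - j) = 100 := by omega
    intro p
    rw [← this]
    exact hst (100 - j) p
  intro p
  have hcongr := pvExpand_congr M (pvCompSeq M c 100) (pvCompSeq M c j) h100 p
  rw [hcongr, ← pvCompSeq_succ, hfix p, ← h100 p]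

theorem mem_pvComp (M : List (List String)) (c : Int × Int)
    (hs : pvInG c = true) (ho : pvIsO M c) (p : Int × Int) :
    p ∈ pvComp M c ↔ pvReach M c p := by
  have hcomp : pvComp M c = pvCompSeq M c 100 := by
    unfold pvComp pvCompSeq
    rfl
  rw [hcomp]
  constructor
  · exact pvCompSeq_reach M c hs ho 100 p
  · intro hreach
    induction hreach with
    | refl =>
      exact pvCompSeq_le_mono M c (Nat.zero_le 100) c
        (by rw [pvCompSeq_zero]; exact List.mem_singleton.2 rfl)
    | tail hcb hadj ih =>
      rename_i b p'
      obtain ⟨hgb, hgp, hob, hop, d, hd, he⟩ := hadj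
      apply (pvComp_fix M c hs ho p').1
      rw [mem_pvExpand]
      exact Or.inr ⟨b, ih, d, hd, he ▸ hgp, he ▸ hop, he⟩

-- ----- outer scans agree -----

def pvdm (j : Int) : Int × Int := (PySem.Int.floordiv j 10, PySem.Int.mod j 10)

theorem pvdm_inG {j : Int} (h0 : 0 ≤ j) (h1 : j < 100) : pvInG (pvdm j) = true := by
  rw [pvInG, decide_eq_true_iff]
  have e1 : PySem.Int.floordiv j 10 = j / 10 := PySem.Int.floordiv_eq_ediv_of_pos (by norm_num)
  have e2 : PySem.Int.mod j 10 = j % 10 := PySem.Int.mod_eq_emod_of_pos (by norm_num)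
  simp only [pvdm, e1, e2]
  omega

theorem pvdm_inj {j j' : Int} (_ : 0 ≤ j) (_ : j < 100) (_ : 0 ≤ j') (_ : j' < 100)
    (h : pvdm j = pvdm j') : j = j' := by
  have a1 := PySem.Int.floordiv_mul_add_mod j 10
  have a2 := PySem.Int.floordiv_mul_add_mod j' 10
  rw [pvdm, pvdm, Prod.mk.injEq] at h
  omega

theorem pvReach_seen {M : List (List String)} {seen : PySem.Set (Int × Int)}
    (hcl : ∀ p ∈ seen, ∀ r, pvAdj M p r → r ∈ seen) {c p : Int × Int}
    (h : pvReach M c p) (hp : p ∈ seen) : c ∈ seen := by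
  induction h with
  | refl => exact hp
  | tail hcb hadj ih => exact ih (hcl _ hp _ (pvAdj_symm hadj))

theorem pvReach_hasNbr {M : List (List String)} {c p : Int × Int}
    (h : pvReach M c p) (hne : p ≠ c) : pvHasNbr M p := by
  rcases (Relation.ReflTransGen.cases_tail h) with he | ⟨b, _, hadj⟩
  · exact absurd he hne
  · exact ⟨b, pvAdj_symm hadj⟩

theorem pvLoopA_cons (M : List (List String)) (j : Int) (rest : List Int) (t : Int)
    (R : (Int × Int) → Int) :
    pvLoopA M (j :: rest) t R =
      if pvCell M (pvdm j).1 (pvdm j).2 = "o" ∧ R (pvdm j) = 0 then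
        if t + 1 ≥ 2 then false
        else pvLoopA M rest (t + 1) (pvBFS M R [pvdm j])
      else pvLoopA M rest t R := by
  simp only [pvLoopA, pvdm]

theorem pvLoopB_cons (M : List (List String)) (c : Int × Int) (rest : List (Int × Int))
    (count : Int) (seen : PySem.Set (Int × Int)) :
    pvLoopB M (c :: rest) count seen =
      if pvCell M c.1 c.2 = "o" ∧ ¬ (PySem.Set.contains seen c = true) then
        if count + 1 ≥ 2 then false
        else pvLoopB M rest (count + 1) (PySem.Set.union seen (pvComp M c))
      else pvLoopB M rest count seen := by
  simp only [pvLoopB]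

theorem pvMain (M : List (List String)) :
    ∀ (js : List Int) (t : Int) (R : (Int × Int) → Int) (seen : PySem.Set (Int × Int)),
      (∀ j ∈ js, 0 ≤ j ∧ j < 100) → js.Nodup →
      (∀ p, pvIsO M p → pvInG p = true → (R p ≠ 0 ↔ p ∈ seen ∧ pvHasNbr M p)) →
      (∀ p ∈ seen, pvInG p = true ∧ pvIsO M p) →
      (∀ p ∈ seen, ∀ r, pvAdj M p r → r ∈ seen) →
      (∀ p ∈ seen, ¬ pvHasNbr M p → p ∉ js.map pvdm) →
      pvLoopA M js t R = pvLoopB M (js.map pvdm) t seen := by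
  intro js
  induction js with
  | nil =>
    intro t R seen _ _ _ _ _ _
    simp only [List.map_nil]
    rw [pvLoopA, pvLoopB]
  | cons j rest ih =>
    intro t R seen hb hnd hInv1 hInv2 hInv3 hInv4
    rw [List.map_cons, pvLoopA_cons, pvLoopB_cons]
    obtain ⟨hj0, hj1⟩ := hb j (List.mem_cons_self ..)
    have hgc : pvInG (pvdm j) = true := pvdm_inG hj0 hj1
    have hbrest : ∀ j' ∈ rest, 0 ≤ j' ∧ j' < 100 :=
      fun j' hj' => hb j' (List.mem_cons_of_mem _ hj')
    have hndrest : rest.Nodup := (List.nodup_cons.1 hnd).2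
    have hjrest : j ∉ rest := (List.nodup_cons.1 hnd).1
    by_cases hsw : pvCell M (pvdm j).1 (pvdm j).2 = "o"
    · have hoc : pvIsO M (pvdm j) := hsw
      have hiff := hInv1 (pvdm j) hoc hgc
      have hseen_iff : R (pvdm j) = 0 ↔ (pvdm j) ∉ seen := by
        constructor
        · intro h0 hc
          by_cases hnb : pvHasNbr M (pvdm j)
          · exact (hiff.2 ⟨hc, hnb⟩) h0
          · exact hInv4 (pvdm j) hc hnb
              (List.mem_map.2 ⟨j, List.mem_cons_self .., rfl⟩)
        · intro hnotin
          by_contra h0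
          exact hnotin (hiff.1 h0).1
      by_cases h0 : R (pvdm j) = 0
      · have hnotin := hseen_iff.1 h0
        have hcondA : pvCell M (pvdm j).1 (pvdm j).2 = "o" ∧ R (pvdm j) = 0 := ⟨hsw, h0⟩
        have hcondB : pvCell M (pvdm j).1 (pvdm j).2 = "o"
            ∧ ¬ (PySem.Set.contains seen (pvdm j) = true) :=
          ⟨hsw, fun hc => hnotin ((PySem.Set.contains_iff _ _).1 hc)⟩
        rw [if_pos hcondA, if_pos hcondB]
        by_cases ht : t + 1 ≥ 2
        · rw [if_pos ht, if_pos ht]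
        · rw [if_neg ht, if_neg ht]
          -- BFS precondition: the whole component of (pvdm j) is unmarked
          have hpre : ∀ p, pvReach M (pvdm j) p → R p = 0 := by
            intro p hr
            by_cases hpc : p = pvdm j
            · rw [hpc]; exact h0
            · rcases pvReach_elem hr with he | ⟨hgp, hop⟩
              · exact absurd he hpc
              · by_contra hR
                have hpseen := (hInv1 p hop hgp).1 hR
                have hcseen := pvReach_seen hInv3 hr hpseen.1
                have hnbc : pvHasNbr M (pvdm j) := by
                  rcases (Relation.ReflTransGen.cases_head hr) with he | ⟨b, hadj, _⟩
                  · exact absurd he.symm hpc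
                  · exact ⟨b, hadj⟩
                exact (hiff.2 ⟨hcseen, hnbc⟩) h0
          have hchar := pvBFS_char M (pvdm j) hgc hoc R hpre
          have hcompm := mem_pvComp M (pvdm j) hgc hoc
          apply ih (t + 1) (pvBFS M R [pvdm j]) (PySem.Set.union seen (pvComp M (pvdm j)))
            hbrest hndrest
          · -- Inv1
            intro p hop hgp
            rw [hchar p hop, PySem.Set.mem_union]
            constructor
            · rintro (hR | ⟨hreach, hnb⟩)
              · have := (hInv1 p hop hgp).1 hR
                exact ⟨Or.inl this.1, this.2⟩
              · exact ⟨Or.inr ((hcompm p).2 hreach), hnb⟩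
            · rintro ⟨hmem | hmem, hnb⟩
              · exact Or.inl ((hInv1 p hop hgp).2 ⟨hmem, hnb⟩)
              · exact Or.inr ⟨(hcompm p).1 hmem, hnb⟩
          · -- Inv2
            intro p hp
            rcases (PySem.Set.mem_union _ _ _).1 hp with hp | hp
            · exact hInv2 p hp
            · have hreach := (hcompm p).1 hp
              rcases pvReach_elem hreach with rfl | h
              · exact ⟨hgc, hoc⟩
              · exact h
          · -- Inv3
            intro p hp r hadj
            rcases (PySem.Set.mem_union _ _ _).1 hp with hp | hp
            · exact (PySem.Set.mem_union _ _ _).2 (Or.inl (hInv3 p hp r hadj))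
            · exact (PySem.Set.mem_union _ _ _).2 (Or.inr ((hcompm r).2
                (Relation.ReflTransGen.tail ((hcompm p).1 hp) hadj)))
          · -- Inv4
            intro p hp hnb hmem
            rcases (PySem.Set.mem_union _ _ _).1 hp with hp | hp
            · exact hInv4 p hp hnb (List.mem_cons_of_mem _ hmem)
            · have hreach := (hcompm p).1 hp
              by_cases hpc : p = pvdm j
              · obtain ⟨j', hj', he⟩ := List.mem_map.1 hmem
                obtain ⟨hj0', hj1'⟩ := hbrest j' hj'
                have : j' = j := pvdm_inj hj0' hj1' hj0 hj1 (by rw [he, hpc])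
                exact hjrest (this ▸ hj')
              · exact hnb (pvReach_hasNbr hreach hpc)
      · have hin : pvdm j ∈ seen := by
          by_contra hnotin
          exact h0 (hseen_iff.2 hnotin)
        rw [if_neg (fun hh => h0 hh.2),
          if_neg (fun hh => hh.2 ((PySem.Set.contains_iff _ _).2 hin))]
        apply ih t R seen hbrest hndrest hInv1 hInv2 hInv3
        intro p hp hnb hmem
        exact hInv4 p hp hnb (List.mem_cons_of_mem _ hmem)
    · rw [if_neg (fun hh => hsw hh.1), if_neg (fun hh => hsw hh.1)]
      apply ih t R seen hbrest hndrest hInv1 hInv2 hInv3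
      intro p hp hnb hmem
      exact hInv4 p hp hnb (List.mem_cons_of_mem _ hmem)

-- ===== VERDICT (by name: the statement is the Claim_ definition above) =====
theorem one_island_or_not_spec : Claim_equal_one_island_or_not := by
  intro M _ _
  unfold Spec_one_island_or_not one_island_or_not one_island_or_not_alt
  have hflat : ((List.range 10).flatMap
      (fun (i : Nat) => (List.range 10).map (fun (j : Nat) => ((i : Int), (j : Int)))))
      = (PySem.List.pyRange 0 100 1).map pvdm := by decide
  rw [hflat]
  apply pvMain M (PySem.List.pyRange 0 100 1) 0 (fun _ => 0) PySem.Set.empty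
  · intro j hj
    have : j ∈ PySem.List.pyRange 0 100 1 := hj
    rw [PySem.List.mem_pyRange_one] at this
    exact this
  · decide
  · intro p _ _
    constructor
    · intro h; exact absurd rfl h
    · rintro ⟨hp, _⟩; exact absurd hp (List.not_mem_nil)
  · intro p hp; exact absurd hp (List.not_mem_nil)
  · intro p hp; exact absurd hp (List.not_mem_nil)
  · intro p hp; exact absurd hp (List.not_mem_nil)
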